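-- pv_equiv track=rewrite | github.com/kamalesh-sudo/Behavioral_Auth_System | backend/ml/behavioral_analyzer.py | create_time_windows
-- ===== SOURCE A (Python) =====
-- def create_time_windows(behavioral_data, window_size=5000):
--     """Create time windows from behavioral data"""
--     keystroke_data = behavioral_data.get('keystrokeData', [])
--     mouse_data = behavioral_data.get('mouseData', [])
--
--     # Combine and sort by timestamp
--     all_events = []
--     for event in keystroke_data:
--         all_events.append(('keystroke', event))
--     for event in mouse_data:
--         all_events.append(('mouse', event))
--
--     all_events.sort(key=lambda x: x[1].get('timestamp', 0))
--
--     # Create windows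
--     windows = []
--     current_window = {'keystrokeData': [], 'mouseData': []}
--
--     for event_type, event in all_events:
--         if event_type == 'keystroke':
--             current_window['keystrokeData'].append(event)
--         else:
--             current_window['mouseData'].append(event)
--
--         # Check if window is full
--         total_events = len(current_window['keystrokeData']) + len(current_window['mouseData'])
--         if total_events >= window_size:
--             windows.append(current_window)
--             current_window = {'keystrokeData': [], 'mouseData': []}
--
--     # Add final window if not empty
--     if current_window['keystrokeData'] or current_window['mouseData']:
--         windows.append(current_window)
--
--     return windows
-- ===== SOURCE B (Python) =====
-- def create_time_windows(behavioral_data, window_size=5000):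
--     """Create time windows from behavioral data (chunk-then-partition)."""
--     tagged = [('keystroke', e) for e in behavioral_data.get('keystrokeData', [])]
--     tagged += [('mouse', e) for e in behavioral_data.get('mouseData', [])]
--     tagged.sort(key=lambda p: p[1].get('timestamp', 0))
--
--     step = window_size if window_size > 0 else 1  # A flushes after every event when window_size <= 0
--     windows = []
--     while tagged:
--         chunk, tagged = tagged[:step], tagged[step:]
--         windows.append({
--             'keystrokeData': [e for t, e in chunk if t == 'keystroke'],
--             'mouseData': [e for t, e in chunk if t != 'keystroke'],
--         })
--     return windows
-- ===== Notes on version B (the rewrite author's own statement) =====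
-- stated objective: simpler
-- what changed: Replaces A's incremental accumulate-and-flush window loop (mutable current window, in-loop size check, trailing non-empty flush) by slicing the sorted tagged event list into fixed-size chunks and partitioning each chunk by tag; window_size <= 0 uses step 1, matching A's flush-after-every-event behaviour.
import Mathlib
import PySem

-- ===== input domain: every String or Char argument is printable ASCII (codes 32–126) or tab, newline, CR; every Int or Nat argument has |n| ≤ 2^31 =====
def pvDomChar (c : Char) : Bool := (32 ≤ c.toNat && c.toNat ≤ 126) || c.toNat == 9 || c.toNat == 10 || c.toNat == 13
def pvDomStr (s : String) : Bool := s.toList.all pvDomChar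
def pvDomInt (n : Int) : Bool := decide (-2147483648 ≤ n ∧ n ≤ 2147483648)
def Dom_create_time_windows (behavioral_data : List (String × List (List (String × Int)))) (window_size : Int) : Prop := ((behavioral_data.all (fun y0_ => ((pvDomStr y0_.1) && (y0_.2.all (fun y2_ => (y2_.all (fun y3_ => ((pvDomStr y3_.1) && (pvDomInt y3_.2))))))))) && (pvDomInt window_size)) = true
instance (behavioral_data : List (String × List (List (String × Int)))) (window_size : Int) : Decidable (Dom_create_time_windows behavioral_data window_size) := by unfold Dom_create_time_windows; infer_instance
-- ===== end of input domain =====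

-- B replaces A's incremental accumulate-and-flush window loop by chunking the sorted tagged
-- event list into fixed-size slices and partitioning each slice (objective: simpler decomposition).

-- ===== PORT A =====
-- loop body of A's 'for event_type, event in all_events' (append to the current window, flush when full)
def pvStepA (ws : Int)
    (st : List (List (String × List (List (String × Int)))) × List (List (String × Int)) × List (List (String × Int)))
    (p : String × List (String × Int)) :
    List (List (String × List (List (String × Int)))) × List (List (String × Int)) × List (List (String × Int)) :=
  let kd := if p.1 == "keystroke" then st.2.1 ++ [p.2] else st.2.1
  let md := if p.1 == "keystroke" then st.2.2 else st.2.2 ++ [p.2]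
  if ((kd.length : Int) + (md.length : Int)) ≥ ws then
    (st.1 ++ [[("keystrokeData", kd), ("mouseData", md)]], [], [])
  else (st.1, kd, md)

-- A's trailing 'if current_window[...] or current_window[...]: windows.append(current_window)'
def pvFinalA
    (st : List (List (String × List (List (String × Int)))) × List (List (String × Int)) × List (List (String × Int))) :
    List (List (String × List (List (String × Int)))) :=
  if !st.2.1.isEmpty || !st.2.2.isEmpty then st.1 ++ [[("keystrokeData", st.2.1), ("mouseData", st.2.2)]]
  else st.1

def create_time_windows (behavioral_data : List (String × List (List (String × Int)))) (window_size : Int) : List (List (String × List (List (String × Int)))) :=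
  let keystroke_data := PySem.Dict.getD (PySem.Dict.mk behavioral_data) "keystrokeData" []
  let mouse_data := PySem.Dict.getD (PySem.Dict.mk behavioral_data) "mouseData" []
  let all0 := keystroke_data.foldl (fun acc e => acc ++ [(("keystroke" : String), e)]) []
  let all1 := mouse_data.foldl (fun acc e => acc ++ [(("mouse" : String), e)]) all0
  let all_events := PySem.List.sorted all1 (fun p => PySem.Dict.getD (PySem.Dict.mk p.2) "timestamp" 0)
  pvFinalA (all_events.foldl (pvStepA window_size) ([], [], []))

-- ===== PORT B =====
-- Source B's 'while tagged: chunk, tagged = tagged[:step], tagged[step:]'; km1 = step - 1 (step ≥ 1),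
-- so tagged[:step] = x :: rest.take km1 and tagged[step:] = rest.drop km1 — structural recursion.
def pvChunks {α : Type} (km1 : Nat) : List α → List (List α)
  | [] => []
  | x :: rest => (x :: rest.take km1) :: pvChunks km1 (rest.drop km1)
termination_by xs => xs.length
decreasing_by simp

-- the fresh window Source B builds from one chunk (partition on the tag)
def pvPartWin (chunk : List (String × List (String × Int))) : List (String × List (List (String × Int))) :=
  [("keystrokeData", (chunk.filter (fun p => p.1 == "keystroke")).map (·.2)),
   ("mouseData", (chunk.filter (fun p => !(p.1 == "keystroke"))).map (·.2))]

def create_time_windows_alt (behavioral_data : List (String × List (List (String × Int)))) (window_size : Int) : List (List (String × List (List (String × Int)))) :=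
  let tagged := (PySem.Dict.getD (PySem.Dict.mk behavioral_data) "keystrokeData" []).map (fun e => (("keystroke" : String), e))
             ++ (PySem.Dict.getD (PySem.Dict.mk behavioral_data) "mouseData" []).map (fun e => (("mouse" : String), e))
  let sortedTagged := PySem.List.sorted tagged (fun p => PySem.Dict.getD (PySem.Dict.mk p.2) "timestamp" 0)
  let step := if window_size > 0 then window_size.toNat else 1
  (pvChunks (step - 1) sortedTagged).map pvPartWin

-- ===== PRECONDITION & SPEC =====
def Spec_create_time_windows (behavioral_data : List (String × List (List (String × Int)))) (window_size : Int) (out : List (List (String × List (List (String × Int))))) : Prop := out = create_time_windows_alt behavioral_data window_size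
instance (behavioral_data : List (String × List (List (String × Int)))) (window_size : Int) (out : List (List (String × List (List (String × Int))))) : Decidable (Spec_create_time_windows behavioral_data window_size out) := by unfold Spec_create_time_windows; infer_instance

-- ===== CLAIM (what is proved, stated in full; the proofs are below) =====
def Claim_equal_create_time_windows : Prop := ∀ (behavioral_data : List (String × List (List (String × Int)))) (window_size : Int), Dom_create_time_windows behavioral_data window_size → Spec_create_time_windows behavioral_data window_size (create_time_windows behavioral_data window_size)

-- ===== LEMMAS AND PROOFS =====

-- filtering a list on p and on ¬p covers it: both empty only when the list is empty
theorem pv_filter_both_empty {α : Type} (p : α → Bool) (l : List α)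
    (h1 : l.filter p = []) (h2 : l.filter (fun x => !(p x)) = []) : l = [] := by
  cases l with
  | nil => rfl
  | cons x xs =>
    cases hx : p x <;> simp [List.filter, hx] at h1 h2

-- when the running count n satisfies 1 <= n < k, A's flush test (count >= window_size) is false
theorem pv_no_flush (ws : Int) (k a : Nat) (hk : k = if ws > 0 then ws.toNat else 1)
    (ha1 : 1 ≤ a) (ha : a < k) : ¬ ((a : Int) ≥ ws) := by
  by_cases hws : ws > 0 <;> simp [hws] at hk <;> omega

-- when the running count reaches k, A's flush test fires
theorem pv_flush (ws : Int) (k a : Nat) (hk : k = if ws > 0 then ws.toNat else 1)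
    (ha : a = k) : ((a : Int) ≥ ws) := by
  by_cases hws : ws > 0 <;> simp [hws] at hk <;> omega

-- running A's loop over fewer events than fit in a window only accumulates (no flush)
theorem pv_fillPartial (ws : Int) (k : Nat) (hk : k = if ws > 0 then ws.toNat else 1) :
    ∀ (c : List (String × List (String × Int)))
      (kd md : List (List (String × Int))) (acc : List (List (String × List (List (String × Int))))),
      kd.length + md.length + c.length < k →
      c.foldl (pvStepA ws) (acc, kd, md)
        = (acc, kd ++ (c.filter (fun p => p.1 == "keystroke")).map (·.2),
               md ++ (c.filter (fun p => !(p.1 == "keystroke"))).map (·.2)) := by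
  intro c
  induction c with
  | nil => intro kd md acc _; simp
  | cons q c' ih =>
    intro kd md acc hlt
    have hlt' : kd.length + md.length + c'.length + 1 < k := by
      simp only [List.length_cons] at hlt; omega
    cases hq : (q.1 == "keystroke") with
    | true =>
      have hstep : pvStepA ws (acc, kd, md) q = (acc, kd ++ [q.2], md) := by
        unfold pvStepA
        simp only [hq, reduceIte]
        rw [if_neg]
        have := pv_no_flush ws k (kd.length + md.length + 1) hk (by omega) (by omega)
        simp only [List.length_append, List.length_cons, List.length_nil]
        push_cast at this ⊢; omega
      simp only [List.foldl_cons, hstep]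
      rw [ih (kd ++ [q.2]) md acc (by simp only [List.length_append, List.length_cons, List.length_nil]; omega)]
      simp [List.filter, hq]
    | false =>
      have hstep : pvStepA ws (acc, kd, md) q = (acc, kd, md ++ [q.2]) := by
        unfold pvStepA
        simp only [hq, Bool.false_eq_true, reduceIte]
        rw [if_neg]
        have := pv_no_flush ws k (kd.length + md.length + 1) hk (by omega) (by omega)
        simp only [List.length_append, List.length_cons, List.length_nil]
        push_cast at this ⊢; omega
      simp only [List.foldl_cons, hstep]
      rw [ih kd (md ++ [q.2]) acc (by simp only [List.length_append, List.length_cons, List.length_nil]; omega)]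
      simp [List.filter, hq]

-- running A's loop over exactly the events that fill the window flushes it at the last event
theorem pv_fillChunk (ws : Int) (k : Nat) (hk : k = if ws > 0 then ws.toNat else 1) :
    ∀ (c : List (String × List (String × Int)))
      (kd md : List (List (String × Int))) (acc : List (List (String × List (List (String × Int))))),
      c ≠ [] →
      kd.length + md.length + c.length = k →
      c.foldl (pvStepA ws) (acc, kd, md)
        = (acc ++ [[("keystrokeData", kd ++ (c.filter (fun p => p.1 == "keystroke")).map (·.2)),
                    ("mouseData", md ++ (c.filter (fun p => !(p.1 == "keystroke"))).map (·.2))]], [], []) := by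
  intro c
  induction c with
  | nil => intro _ _ _ h; exact absurd rfl h
  | cons q c' ih =>
    intro kd md acc _ hlen
    cases c' with
    | nil =>
      have hlen' : kd.length + md.length + 1 = k := by
        simp only [List.length_cons, List.length_nil] at hlen; omega
      cases hq : (q.1 == "keystroke") with
      | true =>
        have hstep : pvStepA ws (acc, kd, md) q
            = (acc ++ [[("keystrokeData", kd ++ [q.2]), ("mouseData", md)]], [], []) := by
          unfold pvStepA
          simp only [hq, reduceIte]
          rw [if_pos]
          have := pv_flush ws k (kd.length + md.length + 1) hk (by omega)
          simp only [List.length_append, List.length_cons, List.length_nil]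
          push_cast at this ⊢; omega
        simp only [List.foldl_cons, List.foldl_nil, hstep]
        simp [List.filter, hq]
      | false =>
        have hstep : pvStepA ws (acc, kd, md) q
            = (acc ++ [[("keystrokeData", kd), ("mouseData", md ++ [q.2])]], [], []) := by
          unfold pvStepA
          simp only [hq, Bool.false_eq_true, reduceIte]
          rw [if_pos]
          have := pv_flush ws k (kd.length + md.length + 1) hk (by omega)
          simp only [List.length_append, List.length_cons, List.length_nil]
          push_cast at this ⊢; omega
        simp only [List.foldl_cons, List.foldl_nil, hstep]
        simp [List.filter, hq]
    | cons r c'' =>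
      have hlt' : kd.length + md.length + 1 < k := by
        simp only [List.length_cons] at hlen; omega
      cases hq : (q.1 == "keystroke") with
      | true =>
        have hstep : pvStepA ws (acc, kd, md) q = (acc, kd ++ [q.2], md) := by
          unfold pvStepA
          simp only [hq, reduceIte]
          rw [if_neg]
          have := pv_no_flush ws k (kd.length + md.length + 1) hk (by omega) (by omega)
          simp only [List.length_append, List.length_cons, List.length_nil]
          push_cast at this ⊢; omega
        rw [List.foldl_cons, hstep]
        rw [ih (kd ++ [q.2]) md acc (by simp)
              (by simp only [List.length_append, List.length_cons, List.length_nil] at hlen ⊢; omega)]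
        simp [List.filter, hq]
      | false =>
        have hstep : pvStepA ws (acc, kd, md) q = (acc, kd, md ++ [q.2]) := by
          unfold pvStepA
          simp only [hq, Bool.false_eq_true, reduceIte]
          rw [if_neg]
          have := pv_no_flush ws k (kd.length + md.length + 1) hk (by omega) (by omega)
          simp only [List.length_append, List.length_cons, List.length_nil]
          push_cast at this ⊢; omega
        rw [List.foldl_cons, hstep]
        rw [ih kd (md ++ [q.2]) acc (by simp)
              (by simp only [List.length_append, List.length_cons, List.length_nil] at hlen ⊢; omega)]
        simp [List.filter, hq]

-- main loop correspondence: A's accumulate-and-flush run from an empty current window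
-- equals B's chunk-then-partition of the same event list
theorem pv_runEq (ws : Int) (k : Nat) (hk : k = if ws > 0 then ws.toNat else 1) :
    ∀ (n : Nat) (evs : List (String × List (String × Int))) (acc : List (List (String × List (List (String × Int))))),
      evs.length ≤ n →
      pvFinalA (evs.foldl (pvStepA ws) (acc, [], [])) = acc ++ (pvChunks (k - 1) evs).map pvPartWin := by
  intro n
  induction n with
  | zero =>
    intro evs acc h
    have : evs = [] := List.eq_nil_of_length_eq_zero (Nat.le_zero.mp h)
    subst this
    simp [pvFinalA, pvChunks]
  | succ m ih =>
    intro evs acc hlen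
    have hk1 : 1 ≤ k := by by_cases hws : ws > 0 <;> simp [hws] at hk <;> omega
    cases evs with
    | nil => simp [pvFinalA, pvChunks]
    | cons x rest =>
      by_cases hsmall : (x :: rest).length < k
      · -- a single partial (final) window
        rw [pv_fillPartial ws k hk (x :: rest) [] [] acc (by simpa using hsmall)]
        have htake : rest.take (k - 1) = rest := by
          apply List.take_of_length_le; simp at hsmall; omega
        have hdrop : rest.drop (k - 1) = [] := by
          apply List.drop_eq_nil_of_le; simp at hsmall; omega
        rw [show pvChunks (k-1) (x :: rest) = (x :: rest.take (k-1)) :: pvChunks (k-1) (rest.drop (k-1)) from by rw [pvChunks],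
            htake, hdrop]
        simp only [pvChunks, List.map_cons, List.map_nil]
        -- the final window is non-empty, so A appends it
        unfold pvFinalA
        have hne : ¬((( (x :: rest).filter (fun p => p.1 == "keystroke")).map (·.2)).isEmpty
                  ∧ ((( (x :: rest).filter (fun p => !(p.1 == "keystroke"))).map (·.2)).isEmpty)) := by
          intro ⟨h1, h2⟩
          simp only [List.isEmpty_iff, List.map_eq_nil_iff] at h1 h2
          exact absurd (pv_filter_both_empty _ _ h1 h2) (by simp)
        rcases Decidable.em (((( (x :: rest).filter (fun p => p.1 == "keystroke")).map (·.2)).isEmpty) = true) with h1 | h1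
        · have h2 : ((( (x :: rest).filter (fun p => !(p.1 == "keystroke"))).map (·.2)).isEmpty) ≠ true := fun h2 => hne ⟨h1, h2⟩
          simp [h1, h2, pvPartWin]
        · simp [h1, pvPartWin]
      · -- a full window then recurse on the remainder
        have hsmall' : k ≤ (x :: rest).length := Nat.le_of_not_lt hsmall
        have hsplit : x :: rest = (x :: rest).take k ++ (x :: rest).drop k := (List.take_append_drop k _).symm
        have h1 : List.foldl (pvStepA ws) (acc, [], []) (x :: rest)
            = List.foldl (pvStepA ws) (acc ++ [pvPartWin ((x :: rest).take k)], [], []) ((x :: rest).drop k) := by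
          conv_lhs => rw [hsplit]
          rw [List.foldl_append,
              pv_fillChunk ws k hk ((x :: rest).take k) [] [] acc
                (by intro h; have := congrArg List.length h; simp at this; omega)
                (by simp only [List.length_take, List.length_nil]; omega)]
          simp [pvPartWin]
        rw [h1, ih ((x :: rest).drop k) _
              (by simp only [List.length_drop, List.length_cons] at hlen ⊢
                  simp only [List.length_cons] at hsmall'; omega)]
        rw [show pvChunks (k-1) (x :: rest) = (x :: rest.take (k-1)) :: pvChunks (k-1) (rest.drop (k-1)) from by rw [pvChunks]]
        have htk : (x :: rest).take k = x :: rest.take (k - 1) := by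
          cases k with
          | zero => omega
          | succ k' => simp [List.take_succ_cons]
        have hdk : (x :: rest).drop k = rest.drop (k - 1) := by
          cases k with
          | zero => omega
          | succ k' => simp [List.drop_succ_cons]
        rw [htk, hdk]
        simp [List.append_assoc]

-- ===== VERDICT (by name: the statement is the Claim_ definition above) =====
theorem create_time_windows_spec : Claim_equal_create_time_windows := by
  intro bd ws _
  unfold Spec_create_time_windows create_time_windows create_time_windows_alt
  simp only [PySem.List.foldl_append_singleton_eq_map, List.nil_append]
  exact (pv_runEq ws (if ws > 0 then ws.toNat else 1) rfl _ _ [] le_rfl).trans (by simp)
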